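-- pv_equiv track=rewrite | github.com/willhammondhimself/ai-glasses-assistant | backend/websocket/handlers.py | _get_analysis_comment
-- ===== SOURCE A (Python) =====
-- def _get_analysis_comment(issues: list) -> str:
--     """Generate JARVIS comment for analysis results."""
--     if not issues:
--         return "No obvious issues detected, sir. The code appears clean."
--
--     security_issues = [i for i in issues if i.get("type") == "security"]
--     if security_issues:
--         return f"Security concern detected, sir. {security_issues[0].get('message', '')}"
--
--     warnings = [i for i in issues if i.get("type") == "warning"]
--     if warnings:
--         return f"I've found {len(issues)} potential issues, sir. Starting with: {warnings[0].get('message', '')}"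
--
--     return f"Analysis complete. {len(issues)} items flagged for review, sir."
-- ===== SOURCE B (Python) =====
-- def _get_analysis_comment(issues: list) -> str:
--     """Single pass: return on first security issue, remember first warning."""
--     if not issues:
--         return "No obvious issues detected, sir. The code appears clean."
--     first_warning = None
--     for i in issues:
--         t = i.get("type")
--         if t == "security":
--             return f"Security concern detected, sir. {i.get('message', '')}"
--         if t == "warning" and first_warning is None:
--             first_warning = i
--     if first_warning is not None:
--         return f"I've found {len(issues)} potential issues, sir. Starting with: {first_warning.get('message', '')}"
--     return f"Analysis complete. {len(issues)} items flagged for review, sir."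
-- ===== Notes on version B (the rewrite author's own statement) =====
-- stated objective: simpler
-- what changed: Replaces the two full filtering passes (security list, then warnings list) by one early-exit loop that returns at the first security issue and remembers only the first warning.
import Mathlib
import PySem

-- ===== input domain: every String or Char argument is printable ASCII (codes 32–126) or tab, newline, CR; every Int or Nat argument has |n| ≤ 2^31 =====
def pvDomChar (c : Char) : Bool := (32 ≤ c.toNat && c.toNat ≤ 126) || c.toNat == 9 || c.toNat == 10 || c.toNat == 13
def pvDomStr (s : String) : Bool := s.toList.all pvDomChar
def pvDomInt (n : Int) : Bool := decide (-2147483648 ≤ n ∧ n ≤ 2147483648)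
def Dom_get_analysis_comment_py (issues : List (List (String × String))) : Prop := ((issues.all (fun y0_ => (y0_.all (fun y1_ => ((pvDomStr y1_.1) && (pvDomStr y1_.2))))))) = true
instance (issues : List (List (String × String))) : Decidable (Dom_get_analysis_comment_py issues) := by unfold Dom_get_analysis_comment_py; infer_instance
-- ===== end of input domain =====

-- ===== PORT A =====
-- One honest line: B replaces A's two filtering passes by a single early-exit loop
-- that returns at the first security issue and remembers the first warning (same result).
def get_analysis_comment_py (issues : List (List (String × String))) : String :=
  if issues = [] then "No obvious issues detected, sir. The code appears clean."
  else
    let security_issues := issues.filter (fun i => (PySem.Dict.ofList i).get? "type" == some "security")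
    match security_issues with
    | s0 :: _ => "Security concern detected, sir. " ++ PySem.Dict.getD (PySem.Dict.ofList s0) "message" ""
    | [] =>
      let warnings := issues.filter (fun i => (PySem.Dict.ofList i).get? "type" == some "warning")
      match warnings with
      | w0 :: _ => "I've found " ++ PySem.Int.toStr (issues.length : Int) ++ " potential issues, sir. Starting with: " ++ PySem.Dict.getD (PySem.Dict.ofList w0) "message" ""
      | [] => "Analysis complete. " ++ PySem.Int.toStr (issues.length : Int) ++ " items flagged for review, sir."

-- ===== PORT B =====
-- the for-loop of Source B: early return on security, carry the first warning seen
def gacLoop (n : Int) (rest : List (List (String × String))) (firstWarning : Option (List (String × String))) : String :=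
  match rest with
  | [] =>
    match firstWarning with
    | some w => "I've found " ++ PySem.Int.toStr n ++ " potential issues, sir. Starting with: " ++ PySem.Dict.getD (PySem.Dict.ofList w) "message" ""
    | none => "Analysis complete. " ++ PySem.Int.toStr n ++ " items flagged for review, sir."
  | i :: rest =>
    let t := (PySem.Dict.ofList i).get? "type"
    if t == some "security" then
      "Security concern detected, sir. " ++ PySem.Dict.getD (PySem.Dict.ofList i) "message" ""
    else if t == some "warning" && firstWarning.isNone then
      gacLoop n rest (some i)
    else
      gacLoop n rest firstWarning

def get_analysis_comment_py_alt (issues : List (List (String × String))) : String :=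
  if issues = [] then "No obvious issues detected, sir. The code appears clean."
  else gacLoop (issues.length : Int) issues none

-- ===== PRECONDITION & SPEC =====
def Spec_get_analysis_comment_py (issues : List (List (String × String))) (out : String) : Prop := out = get_analysis_comment_py_alt issues
instance (issues : List (List (String × String))) (out : String) : Decidable (Spec_get_analysis_comment_py issues out) := by unfold Spec_get_analysis_comment_py; infer_instance

-- ===== CLAIM (what is proved, stated in full; the proofs are below) =====
def Claim_equal_get_analysis_comment_py : Prop := ∀ (issues : List (List (String × String))), Dom_get_analysis_comment_py issues → Spec_get_analysis_comment_py issues (get_analysis_comment_py issues)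

-- ===== LEMMAS AND PROOFS =====

-- characterisation of the loop: first security wins, else the carried-or-first warning
theorem gacLoop_eq (n : Int) (rest : List (List (String × String)))
    (fw : Option (List (String × String))) :
    gacLoop n rest fw =
      match rest.filter (fun i => (PySem.Dict.ofList i).get? "type" == some "security") with
      | s0 :: _ => "Security concern detected, sir. " ++ PySem.Dict.getD (PySem.Dict.ofList s0) "message" ""
      | [] =>
        match fw.or ((rest.filter (fun i => (PySem.Dict.ofList i).get? "type" == some "warning")).head?) with
        | some w => "I've found " ++ PySem.Int.toStr n ++ " potential issues, sir. Starting with: " ++ PySem.Dict.getD (PySem.Dict.ofList w) "message" ""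
        | none => "Analysis complete. " ++ PySem.Int.toStr n ++ " items flagged for review, sir." := by
  induction rest generalizing fw with
  | nil => cases fw <;> simp [gacLoop]
  | cons i rest ih =>
    by_cases hs : ((PySem.Dict.ofList i).get? "type" == some "security") = true
    · simp [gacLoop, hs]
    · by_cases hw : ((PySem.Dict.ofList i).get? "type" == some "warning") = true
      · cases fw with
        | none => simp [gacLoop, hs, hw, ih]
        | some w => simp [gacLoop, hs, hw, ih]
      · simp [gacLoop, hs, hw, ih]

-- ===== VERDICT (by name: the statement is the Claim_ definition above) =====
theorem get_analysis_comment_py_spec : Claim_equal_get_analysis_comment_py := by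
  intro issues _
  unfold Spec_get_analysis_comment_py get_analysis_comment_py get_analysis_comment_py_alt
  by_cases h : issues = []
  · simp [h]
  · simp only [h, if_false]
    rw [gacLoop_eq]
    simp [Option.or]
    have hfind : issues.find? (fun i => (PySem.Dict.ofList i).get? "type" == some "warning")
        = (issues.filter (fun i => (PySem.Dict.ofList i).get? "type" == some "warning")).head? := by
      induction issues with
      | nil => rfl
      | cons i rest ih =>
        by_cases hw : ((PySem.Dict.ofList i).get? "type" == some "warning") = true <;>
          simp [List.find?, hw, ih]
    rcases hf : issues.filter (fun i => (PySem.Dict.ofList i).get? "type" == some "security") with _ | ⟨s0, _⟩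
    · rw [hfind]
      rcases hw : issues.filter (fun i => (PySem.Dict.ofList i).get? "type" == some "warning") with _ | ⟨w0, _⟩ <;> simp
    · simp
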